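-- pv_equiv track=rewrite | github.com/awenzelhuemer/fh-se-python | exercise/Ue05/src/Memory.py | decode_walk
-- ===== SOURCE A (Python) =====
-- def decode_walk(walk):
--     """
--     Calculates end position of given walk
--
--     Parameters:
--         walk: List with directions
--
--     Returns:
--         Calculated final position after walk
--     """
--     x = 0
--     y = 0
--
--     for direction in walk:
--         if direction == 'N':
--             y += 1
--         elif direction == 'S':
--             y -= 1
--         elif direction == 'E':
--             x += 1
--         elif direction == 'W':
--             x -= 1
--         else:
--             raise ValueError("Walk contains an invalid direction")
--     return (x, y)
-- ===== SOURCE B (Python) =====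
-- def decode_walk(walk):
--     """
--     Calculates end position of given walk
--
--     Parameters:
--         walk: List with directions
--
--     Returns:
--         Calculated final position after walk
--     """
--     if not all(d in ('N', 'S', 'E', 'W') for d in walk):
--         raise ValueError("Walk contains an invalid direction")
--     return (walk.count('E') - walk.count('W'),
--             walk.count('N') - walk.count('S'))
-- ===== Notes on version B (the rewrite author's own statement) =====
-- stated objective: idiomatic
-- what changed: Replaces the element-by-element branching accumulation with validate-then-tally: one validation pass and a closed-form pair built from list.count of each direction.
import Mathlib
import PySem

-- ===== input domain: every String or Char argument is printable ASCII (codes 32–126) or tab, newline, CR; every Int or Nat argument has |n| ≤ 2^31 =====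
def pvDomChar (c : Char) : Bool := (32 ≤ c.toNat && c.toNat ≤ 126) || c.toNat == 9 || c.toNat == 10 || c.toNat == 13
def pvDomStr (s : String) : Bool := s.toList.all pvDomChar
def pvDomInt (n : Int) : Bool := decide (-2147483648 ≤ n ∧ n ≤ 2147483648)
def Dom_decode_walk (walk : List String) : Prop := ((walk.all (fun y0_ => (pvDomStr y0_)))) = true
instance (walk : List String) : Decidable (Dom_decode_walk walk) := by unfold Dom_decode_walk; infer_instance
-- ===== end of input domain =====

-- B replaces A's branching accumulator loop by validate-then-tally: one validation
-- pass, then the closed-form pair from list.count of each direction letter.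
-- ===== PORT A =====
-- literal fold of A's loop; the final else is Python's `raise ValueError`, excluded by Pre_
def decode_walk (walk : List String) : Int × Int :=
  walk.foldl (fun (p : Int × Int) direction =>
    if direction = "N" then (p.1, p.2 + 1)
    else if direction = "S" then (p.1, p.2 - 1)
    else if direction = "E" then (p.1 + 1, p.2)
    else if direction = "W" then (p.1 - 1, p.2)
    else p)  -- unreachable under Pre_decode_walk (Python raises ValueError here)
    (0, 0)

-- ===== PORT B =====
def decode_walk_alt (walk : List String) : Int × Int :=
  if walk.all (fun d => d = "N" || d = "S" || d = "E" || d = "W") then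
    (PySem.List.count walk "E" - PySem.List.count walk "W",
     PySem.List.count walk "N" - PySem.List.count walk "S")
  else (0, 0)  -- unreachable under Pre_decode_walk (Python raises ValueError here)

-- ===== PRECONDITION & SPEC =====
-- A raises ValueError on any element outside {N,S,E,W}; exactly those inputs are excluded.
def Pre_decode_walk (walk : List String) : Prop :=
  ∀ d ∈ walk, d = "N" ∨ d = "S" ∨ d = "E" ∨ d = "W"
instance (walk : List String) : Decidable (Pre_decode_walk walk) := by unfold Pre_decode_walk; infer_instance
def pvWitness_decode_walk : List String := ["N", "E", "E", "S", "W"]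
def Spec_decode_walk (walk : List String) (out : Int × Int) : Prop := out = decode_walk_alt walk
instance (walk : List String) (out : Int × Int) : Decidable (Spec_decode_walk walk out) := by unfold Spec_decode_walk; infer_instance

-- ===== CLAIM (what is proved, stated in full; the proofs are below) =====
def Claim_equal_decode_walk : Prop := ∀ (walk : List String), Dom_decode_walk walk → Pre_decode_walk walk → Spec_decode_walk walk (decode_walk walk)

-- ===== LEMMAS AND PROOFS =====
lemma decode_walk_foldl_count (walk : List String) (x y : Int)
    (h : ∀ d ∈ walk, d = "N" ∨ d = "S" ∨ d = "E" ∨ d = "W") :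
    walk.foldl (fun (p : Int × Int) direction =>
      if direction = "N" then (p.1, p.2 + 1)
      else if direction = "S" then (p.1, p.2 - 1)
      else if direction = "E" then (p.1 + 1, p.2)
      else if direction = "W" then (p.1 - 1, p.2)
      else p) (x, y)
    = (x + PySem.List.count walk "E" - PySem.List.count walk "W",
       y + PySem.List.count walk "N" - PySem.List.count walk "S") := by
  induction walk generalizing x y with
  | nil => simp [PySem.List.count]
  | cons d rest ih =>
    have hd := h d (List.mem_cons_self ..)
    have hr : ∀ e ∈ rest, e = "N" ∨ e = "S" ∨ e = "E" ∨ e = "W" :=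
      fun e he => h e (List.mem_cons_of_mem _ he)
    rcases hd with h1 | h1 | h1 | h1 <;> subst h1 <;>
      simp [List.foldl_cons, ih _ _ hr, PySem.List.count] <;>
      omega

-- ===== VERDICT (by name: the statement is the Claim_ definition above) =====
theorem decode_walk_spec : Claim_equal_decode_walk := by
  intro walk _ hpre
  unfold Spec_decode_walk decode_walk decode_walk_alt
  have hall : walk.all (fun d => d = "N" || d = "S" || d = "E" || d = "W") = true := by
    simp only [List.all_eq_true]
    intro d hd
    rcases hpre d hd with h | h | h | h <;> simp [h]
  rw [if_pos hall, decode_walk_foldl_count walk 0 0 hpre]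
  simp
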